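-- pv_equiv track=rewrite | github.com/mbergantino/sock-predictor | lottox_generator_primary.py | ticket_near_details
-- ===== SOURCE A (Python) =====
-- K_NUMS   = 6
--
-- PAIR_WEIGHTS = {("N2","N3"): 4, ("N3","N4"): 1, ("N4","N5"): 2, ("N5","N6"): 3}
--
-- def pos_name(idx): return f"N{idx+1}"
--
-- def ticket_near_details(ticket):
--     # Only adjacent positions present in PAIR_WEIGHTS
--     details = []
--     for i in range(K_NUMS - 1):
--         j = i + 1
--         pi, pj = pos_name(i), pos_name(j)
--         pair = (pi, pj)
--         if pair not in PAIR_WEIGHTS and (pj,pi) not in PAIR_WEIGHTS: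
--             continue
--         g = abs(ticket[i] - ticket[j])
--         details.append((pair, i, j, g))
--     return details
-- ===== SOURCE B (Python) =====
-- K_NUMS   = 6
--
-- PAIR_WEIGHTS = {("N2","N3"): 4, ("N3","N4"): 1, ("N4","N5"): 2, ("N5","N6"): 3}
--
-- def ticket_near_details(ticket):
--     # Walk the weight table directly; recover the 0-based positions from the names.
--     details = []
--     for (pi, pj) in PAIR_WEIGHTS:
--         i = int(pi[1:]) - 1
--         j = int(pj[1:]) - 1
--         details.append(((pi, pj), i, j, abs(ticket[i] - ticket[j])))
--     return details
-- ===== Notes on version B (the rewrite author's own statement) =====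
-- stated objective: simpler
-- what changed: B iterates the PAIR_WEIGHTS table directly and parses the 0-based positions back out of the position names, instead of scanning all adjacent position pairs and filtering by (forward or reversed) dict membership; the continue branch and the range scan disappear.
import Mathlib
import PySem

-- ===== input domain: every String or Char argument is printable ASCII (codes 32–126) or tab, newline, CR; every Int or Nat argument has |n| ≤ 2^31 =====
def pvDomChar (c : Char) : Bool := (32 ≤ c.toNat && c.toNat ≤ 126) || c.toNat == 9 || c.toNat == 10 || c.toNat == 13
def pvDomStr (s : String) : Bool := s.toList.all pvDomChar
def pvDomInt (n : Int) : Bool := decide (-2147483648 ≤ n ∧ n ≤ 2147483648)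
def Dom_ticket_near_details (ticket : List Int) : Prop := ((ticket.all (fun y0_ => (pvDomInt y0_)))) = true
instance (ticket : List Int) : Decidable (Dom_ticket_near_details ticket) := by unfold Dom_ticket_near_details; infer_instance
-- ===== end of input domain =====

-- B iterates the PAIR_WEIGHTS table directly, parsing the 0-based positions out of the
-- position names, instead of scanning all adjacent position pairs and filtering by dict
-- membership (objective: simpler). Return-value equivalence on tickets of length ≥ 6.

-- ===== PORT A =====
-- PAIR_WEIGHTS as an insertion-ordered association list (dict)
def pairWeights : List ((String × String) × Int) :=
  [(("N2","N3"), 4), (("N3","N4"), 1), (("N4","N5"), 2), (("N5","N6"), 3)]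

def posName (idx : Int) : String := "N" ++ PySem.Int.toStr (idx + 1)

-- 'ticket[i]' ported as pyGet? with .getD 0; Pre_ guarantees the index is in range,
-- so the default is never used on admitted inputs (out of range = Python IndexError).
def ticket_near_details (ticket : List Int) : List ((String × String) × Int × Int × Int) :=
  (PySem.List.pyRange 0 (6 - 1) 1).foldl (fun details i =>
    let j := i + 1
    let pi := posName i
    let pj := posName j
    let pair := (pi, pj)
    if ¬ (pairWeights.any (fun kv => kv.1 == pair)) ∧
       ¬ (pairWeights.any (fun kv => kv.1 == (pj, pi))) then
      details
    else
      let g := |((PySem.List.pyGet? ticket i).getD 0) - ((PySem.List.pyGet? ticket j).getD 0)|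
      details ++ [(pair, i, j, g)]) []

-- ===== PORT B =====
-- 'int(pi[1:])' ported as ofStr? ∘ slice with .getD 0; the names in pairWeights always parse.
def parsePos (p : String) : Int :=
  (PySem.Int.ofStr? (PySem.Str.slice p (some 1) none)).getD 0 - 1

def ticket_near_details_alt (ticket : List Int) : List ((String × String) × Int × Int × Int) :=
  pairWeights.foldl (fun details kv =>
    let pi := kv.1.1
    let pj := kv.1.2
    let i := parsePos pi
    let j := parsePos pj
    details ++ [((pi, pj), i, j,
      |((PySem.List.pyGet? ticket i).getD 0) - ((PySem.List.pyGet? ticket j).getD 0)|)]) []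

-- ===== PRECONDITION & SPEC =====
-- Both Pythons raise IndexError when len(ticket) < 6 (positions 1..5 are accessed).
def Pre_ticket_near_details (ticket : List Int) : Prop := 6 ≤ ticket.length
instance (ticket : List Int) : Decidable (Pre_ticket_near_details ticket) := by unfold Pre_ticket_near_details; infer_instance
def pvWitness_ticket_near_details : List Int := [3, 1, 4, 1, 5, 9]

def Spec_ticket_near_details (ticket : List Int) (out : List ((String × String) × Int × Int × Int)) : Prop := out = ticket_near_details_alt ticket
instance (ticket : List Int) (out : List ((String × String) × Int × Int × Int)) : Decidable (Spec_ticket_near_details ticket out) := by unfold Spec_ticket_near_details; infer_instance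

-- ===== CLAIM (what is proved, stated in full; the proofs are below) =====
def Claim_equal_ticket_near_details : Prop := ∀ (ticket : List Int), Dom_ticket_near_details ticket → Pre_ticket_near_details ticket → Spec_ticket_near_details ticket (ticket_near_details ticket)

-- ===== LEMMAS AND PROOFS =====

-- On any ticket with ≥ 6 elements both ports produce the same four rows.
theorem ports_agree (a b c d e f : Int) (rest : List Int) :
    ticket_near_details (a :: b :: c :: d :: e :: f :: rest)
      = ticket_near_details_alt (a :: b :: c :: d :: e :: f :: rest) := by
  unfold ticket_near_details ticket_near_details_alt
  rw [show PySem.List.pyRange 0 (6 - 1) 1 = [0, 1, 2, 3, 4] from by decide]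
  simp only [pairWeights, List.foldl]
  rw [if_neg (by decide), if_neg (by decide), if_neg (by decide), if_neg (by decide),
      if_pos (by decide)]
  norm_num
  rw [show posName 1 = "N2" from by decide, show posName 2 = "N3" from by decide,
      show posName 3 = "N4" from by decide, show posName 4 = "N5" from by decide,
      show posName 5 = "N6" from by decide]
  rw [show parsePos "N2" = 1 from by decide, show parsePos "N3" = 2 from by decide,
      show parsePos "N4" = 3 from by decide, show parsePos "N5" = 4 from by decide,
      show parsePos "N6" = 5 from by decide]
  norm_num [PySem.List.pyGet?, PySem.List.pyIdx?]

-- ===== VERDICT (by name: the statement is the Claim_ definition above) =====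
theorem ticket_near_details_spec : Claim_equal_ticket_near_details := by
  intro ticket _ hpre
  unfold Pre_ticket_near_details at hpre
  unfold Spec_ticket_near_details
  match ticket, hpre with
  | a :: b :: c :: d :: e :: f :: rest, _ => exact ports_agree a b c d e f rest
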